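-- pv_equiv track=rewrite | github.com/okrojekb/Podstawy-programowania-i-przetwarzania-danych | laby_09/2021-IAD-09.py | szukaj_bezpiecznych_dan
-- ===== SOURCE A (Python) =====
-- def szukaj_bezpiecznych_dan(dane, lista):
--     czy_brak_alergenow=[0 for i in range(len(dane))]
--     ile_pasujacych=0
--     for i in range(len(dane)):
--         czy_zawiera=0
--         for j in lista:
--             if dane[i][j]==1:
--                 czy_zawiera=1
--                 break
--         if czy_zawiera==0:
--             czy_brak_alergenow[i]=1
--             ile_pasujacych+=1
--     bezpieczne_dania=[None for i in range(ile_pasujacych)]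
--     licznik=0
--     for i in range(len(czy_brak_alergenow)):
--         if czy_brak_alergenow[i]==1:
--             bezpieczne_dania[licznik]=i
--             licznik+=1
--     return bezpieczne_dania
-- ===== SOURCE B (Python) =====
-- def szukaj_bezpiecznych_dan(dane, lista):
--     return [i for i in range(len(dane)) if all(dane[i][j] != 1 for j in lista)]
-- ===== Notes on version B (the rewrite author's own statement) =====
-- stated objective: simpler
-- what changed: Replaces A's two-phase structure (build a 0/1 flag table plus a match counter, preallocate an exact-size None array, then refill it in a second indexed pass) with a single streaming pass that directly collects the indices of dishes containing no listed allergen.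
-- outside the precondition, e.g. on szukaj_bezpiecznych_dan([{'a': 1}], ['a', 'b']): A returns [], B returns []
import Mathlib
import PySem

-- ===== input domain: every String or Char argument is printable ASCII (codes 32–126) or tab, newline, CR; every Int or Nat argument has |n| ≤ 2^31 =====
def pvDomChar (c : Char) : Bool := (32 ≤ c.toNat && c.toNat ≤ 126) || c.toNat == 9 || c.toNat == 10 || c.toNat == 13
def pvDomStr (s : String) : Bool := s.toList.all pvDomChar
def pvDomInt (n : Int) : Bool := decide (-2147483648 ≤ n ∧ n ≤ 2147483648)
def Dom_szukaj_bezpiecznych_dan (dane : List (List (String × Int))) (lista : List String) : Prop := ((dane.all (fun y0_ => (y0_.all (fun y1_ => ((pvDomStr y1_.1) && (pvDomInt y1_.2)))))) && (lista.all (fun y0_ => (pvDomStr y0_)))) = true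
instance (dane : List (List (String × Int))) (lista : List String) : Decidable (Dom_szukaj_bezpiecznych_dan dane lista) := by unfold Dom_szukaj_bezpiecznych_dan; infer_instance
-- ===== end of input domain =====

-- B replaces A's flag-table + counter + preallocate-and-refill two-phase structure with one
-- streaming pass collecting safe indices directly (objective: simpler; same asymptotic cost).

-- ===== PORT A =====
-- the inner 'for j in lista: if dane[i][j]==1: czy_zawiera=1; break' loop
def rowContains (row : List (String × Int)) : List String → Int
  | [] => 0
  | j :: rest =>
      if PySem.Dict.getD (PySem.Dict.mk row) j 0 = 1 then 1 else rowContains row rest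

def szukaj_bezpiecznych_dan (dane : List (List (String × Int))) (lista : List String) : List Int :=
  -- czy_brak_alergenow = [0 for i in range(len(dane))]
  let czy0 : List Int := (PySem.List.pyRange 0 (dane.length : Int) 1).map (fun _ => 0)
  -- first loop: flags written by index assignment, plus the counter ile_pasujacych
  let st1 := (PySem.List.pyRange 0 (dane.length : Int) 1).foldl
    (fun (st : List Int × Int) i =>
      let czy_zawiera := rowContains (PySem.List.pyGetD dane i []) lista
      if czy_zawiera = 0 then (PySem.List.pySetD st.1 i 1, st.2 + 1) else st)
    (czy0, 0)
  -- bezpieczne_dania = [None for i in range(ile_pasujacych)]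
  let bez0 : List (Option Int) := (PySem.List.pyRange 0 st1.2 1).map (fun _ => none)
  -- second loop: fill the preallocated array at position licznik
  let st2 := (PySem.List.pyRange 0 (st1.1.length : Int) 1).foldl
    (fun (st : List (Option Int) × Int) i =>
      if PySem.List.pyGetD st1.1 i 0 = 1 then (PySem.List.pySetD st.1 st.2 (some i), st.2 + 1) else st)
    (bez0, 0)
  -- the Python array is fully filled at this point (licznik = ile_pasujacych); unwrap the Options
  st2.1.map (fun o => o.getD 0)

-- ===== PORT B =====
-- all(dane[i][j] != 1 for j in lista)
def bezAlergenow (row : List (String × Int)) (lista : List String) : Bool :=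
  lista.all (fun j => PySem.Dict.getD (PySem.Dict.mk row) j 0 != 1)

def szukaj_bezpiecznych_dan_alt (dane : List (List (String × Int))) (lista : List String) : List Int :=
  (PySem.List.pyRange 0 (dane.length : Int) 1).filter
    (fun i => bezAlergenow (PySem.List.pyGetD dane i []) lista)

-- ===== PRECONDITION & SPEC =====
-- Pre_ excludes inputs where some allergen name of lista is missing from some dish's dict:
-- there Python A raises KeyError unless its inner loop breaks on an earlier allergen, so whether
-- A returns at all is an artefact of short-circuit order (a few such inputs on which A happens to
-- return are excluded too; B behaves identically on them — see cites).
def Pre_szukaj_bezpiecznych_dan (dane : List (List (String × Int))) (lista : List String) : Prop :=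
  (dane.all (fun row => lista.all (fun j => PySem.Dict.contains (PySem.Dict.mk row) j))) = true
instance (dane : List (List (String × Int))) (lista : List String) : Decidable (Pre_szukaj_bezpiecznych_dan dane lista) := by unfold Pre_szukaj_bezpiecznych_dan; infer_instance

def pvWitness_szukaj_bezpiecznych_dan : (List (List (String × Int))) × List String :=
  ([[("a", 1), ("b", 0)], [("a", 0), ("b", 0)]], ["a", "b"])

def Spec_szukaj_bezpiecznych_dan (dane : List (List (String × Int))) (lista : List String) (out : List Int) : Prop := out = szukaj_bezpiecznych_dan_alt dane lista
instance (dane : List (List (String × Int))) (lista : List String) (out : List Int) : Decidable (Spec_szukaj_bezpiecznych_dan dane lista out) := by unfold Spec_szukaj_bezpiecznych_dan; infer_instance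

-- ===== CLAIM (what is proved, stated in full; the proofs are below) =====
def Claim_equal_szukaj_bezpiecznych_dan : Prop := ∀ (dane : List (List (String × Int))) (lista : List String), Dom_szukaj_bezpiecznych_dan dane lista → Pre_szukaj_bezpiecznych_dan dane lista → Spec_szukaj_bezpiecznych_dan dane lista (szukaj_bezpiecznych_dan dane lista)

-- ===== LEMMAS AND PROOFS =====

-- the break-loop returns 0 exactly when B's `all` test succeeds
theorem rowContains_eq (row : List (String × Int)) (lista : List String) :
    rowContains row lista = if bezAlergenow row lista then 0 else 1 := by
  induction lista with
  | nil => simp [rowContains, bezAlergenow]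
  | cons j rest ih =>
      simp only [rowContains, bezAlergenow, List.all_cons, Bool.and_eq_true, bne_iff_ne, ne_eq]
      by_cases h : PySem.Dict.getD (PySem.Dict.mk row) j 0 = 1 <;>
        simp [h, ih, bezAlergenow]

-- the flag of a dish, as A computes it
def flagOf (lista : List String) (row : List (String × Int)) : Int :=
  if rowContains row lista = 0 then 1 else 0

-- enumerate over a map
theorem enumerate_map {α β : Type} (g : α → β) (l : List α) (s : Int) :
    PySem.List.enumerate (l.map g) s = (PySem.List.enumerate l s).map (fun p => (p.1, g p.2)) := by
  induction l generalizing s with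
  | nil => simp [PySem.List.enumerate_nil]
  | cons x xs ih => simp [PySem.List.enumerate_cons, ih]

-- PHASE 1: the flag-writing loop over enumerate, with the counter
theorem phase1 (lista : List String) (rows : List (List (String × Int)))
    (pre : List Int) (ile : Int) :
    (PySem.List.enumerate rows (pre.length : Int)).foldl
      (fun (st : List Int × Int) p =>
        if rowContains p.2 lista = 0 then (PySem.List.pySetD st.1 p.1 1, st.2 + 1) else st)
      (pre ++ List.replicate rows.length 0, ile)
    = (pre ++ rows.map (flagOf lista),
       ile + (rows.countP (fun r => rowContains r lista = 0) : Int)) := by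
  induction rows generalizing pre ile with
  | nil => simp
  | cons r rows ih =>
      rw [PySem.List.enumerate_cons]
      simp only [List.foldl_cons]
      by_cases h : rowContains r lista = 0
      · have hset : PySem.List.pySetD (pre ++ List.replicate (r :: rows).length 0)
            ((pre.length : Nat) : Int) 1 = pre ++ 1 :: List.replicate rows.length 0 := by
          rw [PySem.List.pySetD_natCast]
          rw [List.set_append_right _ _ (Nat.le_refl _)]
          simp [List.replicate_succ]
        have := ih (pre ++ [1]) (ile + 1)
        norm_num at this
        simp only [h, hset]
        push_cast at this ⊢
        rw [this]
        simp [flagOf, h, List.countP_cons]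
        ring
      · have := ih (pre ++ [0]) ile
        norm_num at this
        simp only [h]
        have hrw : pre ++ List.replicate (r :: rows).length 0
            = pre ++ 0 :: List.replicate rows.length 0 := by
          simp [List.replicate_succ]
        rw [hrw]
        push_cast at this ⊢
        rw [this]
        simp [flagOf, h, List.countP_cons]

-- PHASE 2: the compaction loop filling the preallocated array
theorem phase2 (czy : List Int) (s : Int) (pre : List (Option Int)) :
    (PySem.List.enumerate czy s).foldl
      (fun (st : List (Option Int) × Int) p =>
        if p.2 = 1 then (PySem.List.pySetD st.1 st.2 (some p.1), st.2 + 1) else st)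
      (pre ++ List.replicate (czy.countP (fun x => x = 1)) none, (pre.length : Int))
    = (pre ++ ((PySem.List.enumerate czy s).filter (fun p => p.2 == 1)).map (fun p => some p.1),
       (pre.length : Int) + (czy.countP (fun x => x = 1) : Int)) := by
  induction czy generalizing s pre with
  | nil => simp
  | cons c czy ih =>
      rw [PySem.List.enumerate_cons]
      simp only [List.foldl_cons]
      by_cases h : c = 1
      · subst h
        have hcount : ((1 : Int) :: czy).countP (fun x => decide (x = 1))
            = czy.countP (fun x => decide (x = 1)) + 1 := by
          simp [List.countP_cons]
        have hset : PySem.List.pySetD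
            (pre ++ List.replicate (((1 : Int) :: czy).countP (fun x => decide (x = 1))) none)
            ((pre.length : Nat) : Int) (some s)
            = pre ++ some s :: List.replicate (czy.countP (fun x => decide (x = 1))) none := by
          rw [PySem.List.pySetD_natCast, hcount]
          rw [List.set_append_right _ _ (Nat.le_refl _)]
          simp [List.replicate_succ]
        have := ih (s + 1) (pre ++ [some s])
        norm_num at this
        simp only [hset]
        push_cast at this ⊢
        rw [this]
        simp [List.filter_cons, hcount]
        push_cast
        ring
      · have hcount : (c :: czy).countP (fun x => decide (x = 1))
            = czy.countP (fun x => decide (x = 1)) := by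
          simp [List.countP_cons, h]
        simp only [if_neg h, hcount]
        rw [ih (s + 1) pre]
        simp [List.filter_cons, h]

-- a fold over 'range(len(xs))' whose body reads both the index and xs[i] is a fold over enumerate
theorem foldl_pyRange_enumerate {α β : Type} (xs : List α) (d : α) (f : β → Int × α → β) (init : β) :
    (PySem.List.pyRange 0 (xs.length : Int) 1).foldl
      (fun acc i => f acc (i, PySem.List.pyGetD xs i d)) init
    = (PySem.List.enumerate xs 0).foldl f init := by
  rw [PySem.List.enumerate_eq_map_pyRange (d := d), List.foldl_map]
  simp [PySem.List.len_eq]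

-- same for filter: B's pass over range(len(xs)) is a filter of enumerate projected to indices
theorem filter_pyRange_enumerate {α : Type} (xs : List α) (d : α) (p : α → Bool) :
    (PySem.List.pyRange 0 (xs.length : Int) 1).filter (fun i => p (PySem.List.pyGetD xs i d))
    = ((PySem.List.enumerate xs 0).filter (fun q => p q.2)).map (fun q => q.1) := by
  rw [PySem.List.enumerate_eq_map_pyRange (d := d), List.filter_map, List.map_map]
  simp [PySem.List.len_eq, Function.comp_def]

theorem map_const_pyRange {α : Type} (n : Nat) (b : α) :
    ((PySem.List.pyRange 0 (n : Int) 1).map (fun _ => b)) = List.replicate n b := by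
  rw [List.map_const']
  simp [PySem.List.length_pyRange_one]

-- ===== VERDICT (by name: the statement is the Claim_ definition above) =====
theorem szukaj_bezpiecznych_dan_spec : Claim_equal_szukaj_bezpiecznych_dan := by
  intro dane lista _hdom _hpre
  unfold Spec_szukaj_bezpiecznych_dan
  simp only [szukaj_bezpiecznych_dan, szukaj_bezpiecznych_dan_alt]
  -- phase 1
  have h1 : (PySem.List.pyRange 0 (dane.length : Int) 1).foldl
      (fun (st : List Int × Int) i =>
        if rowContains (PySem.List.pyGetD dane i []) lista = 0
        then (PySem.List.pySetD st.1 i 1, st.2 + 1) else st)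
      ((PySem.List.pyRange 0 (dane.length : Int) 1).map (fun _ => 0), 0)
      = (dane.map (flagOf lista), (dane.countP (fun r => rowContains r lista = 0) : Int)) := by
    rw [map_const_pyRange]
    rw [foldl_pyRange_enumerate dane []
      (f := fun (st : List Int × Int) p =>
        if rowContains p.2 lista = 0 then (PySem.List.pySetD st.1 p.1 1, st.2 + 1) else st)]
    have := phase1 lista dane [] 0
    simpa using this
  rw [h1]
  -- the flag test is B's safety test
  have hflag : ∀ r, ((flagOf lista r == 1) = bezAlergenow r lista) := by
    intro r
    simp only [flagOf, rowContains_eq]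
    by_cases hb : bezAlergenow r lista <;> simp [hb]
  -- count over the flag list = count of safe rows
  have hcnt : (dane.map (flagOf lista)).countP (fun x => x = 1)
      = dane.countP (fun r => rowContains r lista = 0) := by
    rw [List.countP_map]
    apply List.countP_congr
    intro r _
    simp only [Function.comp_apply, flagOf, rowContains_eq]
    by_cases hb : bezAlergenow r lista <;> simp [hb]
  have hcast : (dane.countP (fun r => rowContains r lista = 0) : Int)
      = ((dane.countP (fun r => rowContains r lista = 0) : Nat) : Int) := rfl
  -- phase 2
  rw [hcast, map_const_pyRange, ← hcnt]
  rw [foldl_pyRange_enumerate (dane.map (flagOf lista)) 0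
    (f := fun (st : List (Option Int) × Int) p =>
      if p.2 = 1 then (PySem.List.pySetD st.1 st.2 (some p.1), st.2 + 1) else st)]
  have h2 := phase2 (dane.map (flagOf lista)) 0 []
  simp only [List.nil_append, List.length_nil, Nat.cast_zero] at h2
  rw [h2]
  -- unwrap the options and identify both sides as the filtered index list
  rw [filter_pyRange_enumerate dane [] (fun row => bezAlergenow row lista)]
  rw [enumerate_map (flagOf lista) dane 0]
  rw [List.filter_map, List.map_map, List.map_map]
  simp [Function.comp_def, hflag]
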